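-- pv_equiv track=rewrite | github.com/HBCharley/ASM-Notebook | asm_notebook/api_main.py | _surface_class
-- ===== SOURCE A (Python) =====
-- def _surface_class(domain: str) -> str:
--     d = domain.lower()
--     if d.startswith(("api.", "api-")) or ".api." in d:
--         return "api"
--     if d.startswith(("admin.", "admin-")) or ".admin." in d:
--         return "admin"
--     if d.startswith(("staging.", "stage.", "dev.", "test.")) or any(
--         x in d for x in (".staging.", ".stage.", ".dev.", ".test.")
--     ):
--         return "staging"
--     if d.startswith(("mail.", "smtp.", "mx.")) or ".mail." in d:
--         return "email"
--     if d.startswith(("vpn.", "remote.")) or ".vpn." in d: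
--         return "vpn"
--     return "web"
-- ===== SOURCE B (Python) =====
-- CATS = ["api", "admin", "staging", "email", "vpn", "web"]
--
-- # (pattern, priority) tables; priority = index into CATS
-- HEAD = [("api.", 0), ("api-", 0), ("admin.", 1), ("admin-", 1),
--         ("staging.", 2), ("stage.", 2), ("dev.", 2), ("test.", 2),
--         ("mail.", 3), ("smtp.", 3), ("mx.", 3), ("vpn.", 4), ("remote.", 4)]
-- INNER = [(".api.", 0), (".admin.", 1), (".staging.", 2), (".stage.", 2),
--          (".dev.", 2), (".test.", 2), (".mail.", 3), (".vpn.", 4)]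
--
--
-- def _surface_class(domain: str) -> str:
--     d = domain.lower()
--     best = 5
--     for pat, p in HEAD:
--         if d.startswith(pat):
--             best = min(best, p)
--     for i in range(len(d)):
--         for pat, p in INNER:
--             if d.startswith(pat, i):
--                 best = min(best, p)
--     return CATS[best]
-- ===== Notes on version B (the rewrite author's own statement) =====
-- stated objective: alternative
-- what changed: A's ordered early-return chain of independent substring searches is replaced by an exhaustive single left-to-right scan over all positions that computes the minimum category priority of every prefix/interior pattern match and indexes a category table with it.
import Mathlib
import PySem

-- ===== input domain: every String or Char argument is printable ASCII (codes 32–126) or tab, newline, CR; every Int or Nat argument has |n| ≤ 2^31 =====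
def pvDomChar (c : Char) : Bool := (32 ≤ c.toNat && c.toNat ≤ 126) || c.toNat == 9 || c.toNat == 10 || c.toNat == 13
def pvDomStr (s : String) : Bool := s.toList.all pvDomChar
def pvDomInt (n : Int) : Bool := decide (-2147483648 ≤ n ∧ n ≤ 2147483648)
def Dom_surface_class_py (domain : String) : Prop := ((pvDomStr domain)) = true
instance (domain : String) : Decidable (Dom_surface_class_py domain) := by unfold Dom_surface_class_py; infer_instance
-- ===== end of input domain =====

-- B replaces A's ordered early-return chain of independent substring searches by one exhaustive
-- left-to-right scan computing the minimum matching category priority, then indexes a category table.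

-- ===== PORT A =====
def surface_class_py (domain : String) : String :=
  let d := PySem.Str.lower domain
  if (PySem.Str.startswith d "api." || PySem.Str.startswith d "api-") || PySem.Str.isIn ".api." d then "api"
  else if (PySem.Str.startswith d "admin." || PySem.Str.startswith d "admin-") || PySem.Str.isIn ".admin." d then "admin"
  else if (PySem.Str.startswith d "staging." || PySem.Str.startswith d "stage." ||
           PySem.Str.startswith d "dev." || PySem.Str.startswith d "test.") ||
          ([".staging.", ".stage.", ".dev.", ".test."].any (fun x => PySem.Str.isIn x d)) then "staging"
  else if (PySem.Str.startswith d "mail." || PySem.Str.startswith d "smtp." || PySem.Str.startswith d "mx.") ||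
          PySem.Str.isIn ".mail." d then "email"
  else if (PySem.Str.startswith d "vpn." || PySem.Str.startswith d "remote.") || PySem.Str.isIn ".vpn." d then "vpn"
  else "web"

-- ===== PORT B =====
def pvCats : List String := ["api", "admin", "staging", "email", "vpn", "web"]

def pvHead : List (List Char × Nat) :=
  [("api.".toList, 0), ("api-".toList, 0), ("admin.".toList, 1), ("admin-".toList, 1),
   ("staging.".toList, 2), ("stage.".toList, 2), ("dev.".toList, 2), ("test.".toList, 2),
   ("mail.".toList, 3), ("smtp.".toList, 3), ("mx.".toList, 3), ("vpn.".toList, 4), ("remote.".toList, 4)]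

def pvInner : List (List Char × Nat) :=
  [(".api.".toList, 0), (".admin.".toList, 1), (".staging.".toList, 2), (".stage.".toList, 2),
   (".dev.".toList, 2), (".test.".toList, 2), (".mail.".toList, 3), (".vpn.".toList, 4)]

-- 'if d.startswith(pat, i): best = min(best, p)' for one table entry, at the suffix starting at i
def pvUpd (l : List Char) (b : Nat) (x : List Char × Nat) : Nat :=
  if PySem.Chars.startswith l x.1 then min b x.2 else b

-- 'for i in range(len(d)): for pat, p in INNER: …' — one pass over all suffix positions
def pvScan : List Char → Nat → Nat
  | [], b => b
  | c :: r, b => pvScan r (pvInner.foldl (pvUpd (c :: r)) b)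

def surface_class_py_alt (domain : String) : String :=
  let dl := PySem.Chars.lower domain.toList
  let b0 := pvHead.foldl (pvUpd dl) 5
  pvCats.getD (pvScan dl b0) "web"

-- ===== PRECONDITION & SPEC =====
def Spec_surface_class_py (domain : String) (out : String) : Prop := out = surface_class_py_alt domain
instance (domain : String) (out : String) : Decidable (Spec_surface_class_py domain out) := by unfold Spec_surface_class_py; infer_instance

-- ===== CLAIM (what is proved, stated in full; the proofs are below) =====
def Claim_equal_surface_class_py : Prop := ∀ (domain : String), Dom_surface_class_py domain → Spec_surface_class_py domain (surface_class_py domain)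

-- ===== LEMMAS AND PROOFS =====

-- priority of the first true flag (the category A would return)
def pvRank (a b c d e : Bool) : Nat :=
  if a then 0 else if b then 1 else if c then 2 else if d then 3 else if e then 4 else 5

-- the two table folds, abstracted to their match flags
def pvFoldB (init : Nat) : List (Bool × Nat) → Nat :=
  List.foldl (fun acc x => if x.1 then min acc x.2 else acc) init

theorem pvRank_le (a b c d e : Bool) : pvRank a b c d e ≤ 5 := by
  unfold pvRank; split_ifs <;> omega

theorem pv_upd_le (l : List Char) (b : Nat) (x : List Char × Nat) (hb : b ≤ 5) (hx : x.2 ≤ 5) :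
    pvUpd l b x ≤ 5 := by
  unfold pvUpd; split_ifs <;> omega

theorem pv_foldmin (l : List Char) (xs : List (List Char × Nat)) (hxs : ∀ x ∈ xs, x.2 ≤ 5) :
    ∀ b, b ≤ 5 → xs.foldl (pvUpd l) b = min b (xs.foldl (pvUpd l) 5) := by
  induction xs with
  | nil => intro b hb; simp; omega
  | cons x xs ih =>
    intro b hb
    have hx : x.2 ≤ 5 := hxs x (by simp)
    have hxs' : ∀ y ∈ xs, y.2 ≤ 5 := fun y hy => hxs y (by simp [hy])
    have h1 := ih hxs' (pvUpd l b x) (pv_upd_le l b x hb hx)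
    have h2 := ih hxs' (pvUpd l 5 x) (pv_upd_le l 5 x (by omega) hx)
    simp only [List.foldl_cons, h1, h2]
    unfold pvUpd; split_ifs <;> omega

theorem pv_isIn_cons (sub : List Char) (c : Char) (r : List Char) :
    PySem.Chars.isIn sub (c :: r) = (PySem.Chars.startswith (c :: r) sub || PySem.Chars.isIn sub r) := by
  apply Bool.eq_iff_iff.mpr
  simp [PySem.Chars.isIn_iff_infix, PySem.Chars.startswith_iff, List.infix_cons_iff]

theorem pvFoldB13 : ∀ b0 b1 b2 b3 b4 b5 b6 b7 b8 b9 b10 b11 b12 : Bool,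
    pvFoldB 5 [(b0,0),(b1,0),(b2,1),(b3,1),(b4,2),(b5,2),(b6,2),(b7,2),(b8,3),(b9,3),(b10,3),(b11,4),(b12,4)] =
      pvRank (b0 || b1) (b2 || b3) (b4 || b5 || b6 || b7) (b8 || b9 || b10) (b11 || b12) := by
  decide

theorem pvFoldB8 : ∀ b0 b1 b2 b3 b4 b5 b6 b7 : Bool,
    pvFoldB 5 [(b0,0),(b1,1),(b2,2),(b3,2),(b4,2),(b5,2),(b6,3),(b7,4)] =
      pvRank b0 b1 (b2 || b3 || b4 || b5) b6 b7 := by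
  decide

-- the head-table fold, evaluated to a rank of the five prefix clusters
theorem pv_head_eval (l : List Char) :
    pvHead.foldl (pvUpd l) 5 =
      pvRank (PySem.Chars.startswith l "api.".toList || PySem.Chars.startswith l "api-".toList)
             (PySem.Chars.startswith l "admin.".toList || PySem.Chars.startswith l "admin-".toList)
             (PySem.Chars.startswith l "staging.".toList || PySem.Chars.startswith l "stage.".toList ||
              PySem.Chars.startswith l "dev.".toList || PySem.Chars.startswith l "test.".toList)
             (PySem.Chars.startswith l "mail.".toList || PySem.Chars.startswith l "smtp.".toList ||
              PySem.Chars.startswith l "mx.".toList)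
             (PySem.Chars.startswith l "vpn.".toList || PySem.Chars.startswith l "remote.".toList) := by
  rw [← pvFoldB13]
  simp only [pvHead, pvFoldB, List.foldl_cons, List.foldl_nil, pvUpd]

-- the inner-table fold at one suffix position
theorem pv_inner_eval (l : List Char) (b : Nat) (hb : b ≤ 5) :
    pvInner.foldl (pvUpd l) b =
      min b (pvRank (PySem.Chars.startswith l ".api.".toList)
                    (PySem.Chars.startswith l ".admin.".toList)
                    (PySem.Chars.startswith l ".staging.".toList || PySem.Chars.startswith l ".stage.".toList ||
                     PySem.Chars.startswith l ".dev.".toList || PySem.Chars.startswith l ".test.".toList)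
                    (PySem.Chars.startswith l ".mail.".toList)
                    (PySem.Chars.startswith l ".vpn.".toList)) := by
  rw [pv_foldmin l pvInner (by decide) b hb, ← pvFoldB8]
  simp only [pvInner, pvFoldB, List.foldl_cons, List.foldl_nil, pvUpd]

theorem pv_or8 : ∀ a b c d w x y z : Bool,
    (a || b || c || d || (w || x || y || z)) = (a || w || (b || x) || (c || y) || (d || z)) := by
  decide

theorem pv_rank_min_or : ∀ s0 s1 s2 s3 s4 a0 a1 a2 a3 a4 : Bool,
    min (pvRank s0 s1 s2 s3 s4) (pvRank a0 a1 a2 a3 a4) =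
      pvRank (s0 || a0) (s1 || a1) (s2 || a2) (s3 || a3) (s4 || a4) := by
  decide

-- the scan, characterised: minimum of the start value and the rank of the interior clusters
theorem pv_scan_eval (l : List Char) : ∀ b, b ≤ 5 →
    pvScan l b =
      min b (pvRank (PySem.Chars.isIn ".api.".toList l)
                    (PySem.Chars.isIn ".admin.".toList l)
                    (PySem.Chars.isIn ".staging.".toList l || PySem.Chars.isIn ".stage.".toList l ||
                     PySem.Chars.isIn ".dev.".toList l || PySem.Chars.isIn ".test.".toList l)
                    (PySem.Chars.isIn ".mail.".toList l)
                    (PySem.Chars.isIn ".vpn.".toList l)) := by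
  induction l with
  | nil =>
    intro b hb
    rw [pvScan]
    rw [show PySem.Chars.isIn ".api.".toList [] = false from by decide,
        show PySem.Chars.isIn ".admin.".toList [] = false from by decide,
        show PySem.Chars.isIn ".staging.".toList [] = false from by decide,
        show PySem.Chars.isIn ".stage.".toList [] = false from by decide,
        show PySem.Chars.isIn ".dev.".toList [] = false from by decide,
        show PySem.Chars.isIn ".test.".toList [] = false from by decide,
        show PySem.Chars.isIn ".mail.".toList [] = false from by decide,
        show PySem.Chars.isIn ".vpn.".toList [] = false from by decide]
    simp [pvRank]; omega
  | cons c r ih =>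
    intro b hb
    rw [pvScan, pv_inner_eval _ _ hb]
    rw [ih _ (le_trans (Nat.min_le_left _ _) hb)]
    rw [Nat.min_assoc, pv_rank_min_or]
    refine congrArg (min b) ?_
    simp only [pv_isIn_cons]
    congr 1; exact pv_or8 _ _ _ _ _ _ _ _

-- the if-chain over the five combined flags is exactly indexing pvCats by the rank
theorem pv_chain_eq_getD : ∀ x0 x1 x2 x3 x4 : Bool,
    (if x0 then "api" else if x1 then "admin" else if x2 then "staging"
     else if x3 then "email" else if x4 then "vpn" else "web") =
      pvCats.getD (pvRank x0 x1 x2 x3 x4) "web" := by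
  decide

-- ===== VERDICT (by name: the statement is the Claim_ definition above) =====
theorem surface_class_py_spec : Claim_equal_surface_class_py := by
  intro domain _
  unfold Spec_surface_class_py surface_class_py surface_class_py_alt
  simp only [PySem.Str.startswith_eq, PySem.Str.isIn_eq, PySem.Str.toList_lower, List.any_cons,
    List.any_nil, Bool.or_false]
  rw [pv_head_eval, pv_scan_eval _ _ (pvRank_le _ _ _ _ _), pv_rank_min_or, ← pv_chain_eq_getD]
  simp [Bool.or_assoc]
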